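-- pv_equiv track=rewrite | github.com/sonpham-org/arc-agi-3 | scaffoldings/agent_spawn/tools.py | as_render_grid
-- ===== SOURCE A (Python) =====
-- COLOR_NAMES = {
--     0: "White", 1: "LightGray", 2: "Gray", 3: "DarkGray",
--     4: "VeryDarkGray", 5: "Black", 6: "Magenta", 7: "LightMagenta",
--     8: "Red", 9: "Blue", 10: "LightBlue", 11: "Yellow",
--     12: "Orange", 13: "Maroon", 14: "Green", 15: "Purple",
-- }
--
-- def as_render_grid(grid: list) -> str:
--     """Text render with numbered rows, each row as space-separated color names or RLE."""
--     if not grid: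
--         return "(empty grid)"
--     lines = []
--     for i, row in enumerate(grid):
--         color_names = [COLOR_NAMES.get(c, str(c)) for c in row]
--         # RLE compress color names
--         if not color_names:
--             lines.append(f"  Row {i:2d}: (empty)")
--             continue
--         parts = []
--         run_color = color_names[0]
--         run_len = 1
--         for cn in color_names[1:]:
--             if cn == run_color:
--                 run_len += 1
--             else:
--                 parts.append(f"{run_len}x{run_color}" if run_len >= 3 else " ".join([run_color] * run_len))
--                 run_color = cn
--                 run_len = 1
--         parts.append(f"{run_len}x{run_color}" if run_len >= 3 else " ".join([run_color] * run_len))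
--         lines.append(f"  Row {i:2d}: {' '.join(parts)}")
--     return "\n".join(lines)
-- ===== SOURCE B (Python) =====
-- COLOR_NAMES = {
--     0: "White", 1: "LightGray", 2: "Gray", 3: "DarkGray",
--     4: "VeryDarkGray", 5: "Black", 6: "Magenta", 7: "LightMagenta",
--     8: "Red", 9: "Blue", 10: "LightBlue", 11: "Yellow",
--     12: "Orange", 13: "Maroon", 14: "Green", 15: "Purple",
-- }
--
-- def _rle_tokens(names):
--     """Two-pointer span scan: each step finds the whole run at once."""
--     tokens = []
--     j = 0
--     n = len(names)
--     while j < n: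
--         k = j + 1
--         while k < n and names[k] == names[j]:
--             k += 1
--         run = k - j
--         tokens.append(f"{run}x{names[j]}" if run >= 3 else " ".join([names[j]] * run))
--         j = k
--     return tokens
--
-- def as_render_grid(grid: list) -> str:
--     """Text render with numbered rows, each row as space-separated color names or RLE."""
--     if not grid:
--         return "(empty grid)"
--     return "\n".join(
--         f"  Row {i:2d}: (empty)" if not row
--         else f"  Row {i:2d}: " + " ".join(_rle_tokens([COLOR_NAMES.get(c, str(c)) for c in row]))
--         for i, row in enumerate(grid)
--     )
-- ===== Notes on version B (the rewrite author's own statement) =====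
-- stated objective: alternative
-- what changed: A's inner run-tracking loop with a carried (parts, run_color, run_len) accumulator and an end-of-loop flush is replaced by a two-pointer span scan that locates each maximal run at once and maps it straight to its token; the outer loop becomes a single generator expression fed to join.
import Mathlib
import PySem

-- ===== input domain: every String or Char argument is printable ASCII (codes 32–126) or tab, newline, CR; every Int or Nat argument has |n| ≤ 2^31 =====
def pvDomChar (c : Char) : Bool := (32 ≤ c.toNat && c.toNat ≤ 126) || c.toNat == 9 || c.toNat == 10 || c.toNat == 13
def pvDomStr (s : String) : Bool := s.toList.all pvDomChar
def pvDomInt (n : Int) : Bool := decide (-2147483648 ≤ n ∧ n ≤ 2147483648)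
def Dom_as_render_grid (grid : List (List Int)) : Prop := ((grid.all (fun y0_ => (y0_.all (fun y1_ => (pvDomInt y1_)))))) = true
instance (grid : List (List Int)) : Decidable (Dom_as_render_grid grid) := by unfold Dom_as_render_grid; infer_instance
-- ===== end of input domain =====

-- B replaces A's carried run accumulator (run_color/run_len with an end-of-loop flush)
-- by a two-pointer span scan that emits each whole run at once (objective: alternative).

-- shared module constant: COLOR_NAMES
def pvColors : PySem.Dict Int String := PySem.Dict.ofList
  [(0, "White"), (1, "LightGray"), (2, "Gray"), (3, "DarkGray"),
   (4, "VeryDarkGray"), (5, "Black"), (6, "Magenta"), (7, "LightMagenta"),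
   (8, "Red"), (9, "Blue"), (10, "LightBlue"), (11, "Yellow"),
   (12, "Orange"), (13, "Maroon"), (14, "Green"), (15, "Purple")]

-- COLOR_NAMES.get(c, str(c))
def pvColorName (c : Int) : String := pvColors.getD c (PySem.Int.toStr c)

-- f"{i:2d}" for the (nonnegative) row index i
def pvRowNum (i : Int) : String :=
  if i < 10 then " " ++ PySem.Int.toStr i else PySem.Int.toStr i

-- ===== PORT A =====
-- the f-string token  f"{run_len}x{run_color}" if run_len >= 3 else " ".join([run_color]*run_len)
def pvTokA (rc : String) (rl : Nat) : String :=
  if 3 ≤ rl then PySem.Int.toStr rl ++ "x" ++ rc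
  else PySem.Str.join " " (List.replicate rl rc)

-- the inner for-loop over color_names[1:] with state (parts, run_color, run_len), plus the final flush append
def pvLoopA : List String → List String → String → Nat → List String
  | [], parts, rc, rl => parts ++ [pvTokA rc rl]
  | cn :: rest, parts, rc, rl =>
    if cn == rc then pvLoopA rest parts rc (rl + 1)
    else pvLoopA rest (parts ++ [pvTokA rc rl]) cn 1

-- one iteration of the outer loop body (appends one line for row i)
def pvLineA (i : Int) (row : List Int) : String :=
  match row.map pvColorName with
  | [] => "  Row " ++ pvRowNum i ++ ": (empty)"
  | c0 :: rest => "  Row " ++ pvRowNum i ++ ": " ++ PySem.Str.join " " (pvLoopA rest [] c0 1)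

def as_render_grid (grid : List (List Int)) : String :=
  match grid with
  | [] => "(empty grid)"
  | _ =>
    let lines := (PySem.List.enumerate grid).foldl (fun ls p => ls ++ [pvLineA p.1 p.2]) []
    PySem.Str.join "\n" lines

-- ===== PORT B =====
def pvTokB (rc : String) (rl : Nat) : String :=
  if 3 ≤ rl then PySem.Int.toStr rl ++ "x" ++ rc
  else PySem.Str.join " " (List.replicate rl rc)

-- _rle_tokens: the outer while advances j to k = end of the current run (inner while = span scan)
def pvRleTokens : List String → List String
  | [] => []
  | x :: xs =>
    pvTokB x (1 + (xs.takeWhile (· == x)).length) :: pvRleTokens (xs.dropWhile (· == x))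
termination_by names => names.length
decreasing_by
  simp only [List.length_cons]
  exact Nat.lt_succ_of_le (List.length_dropWhile_le _ _)

def pvLineB (i : Int) (row : List Int) : String :=
  if row = [] then "  Row " ++ pvRowNum i ++ ": (empty)"
  else "  Row " ++ pvRowNum i ++ ": " ++ PySem.Str.join " " (pvRleTokens (row.map pvColorName))

def as_render_grid_alt (grid : List (List Int)) : String :=
  if grid = [] then "(empty grid)"
  else PySem.Str.join "\n" ((PySem.List.enumerate grid).map (fun p => pvLineB p.1 p.2))

-- ===== PRECONDITION & SPEC =====
def Spec_as_render_grid (grid : List (List Int)) (out : String) : Prop := out = as_render_grid_alt grid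
instance (grid : List (List Int)) (out : String) : Decidable (Spec_as_render_grid grid out) := by unfold Spec_as_render_grid; infer_instance

-- ===== CLAIM (what is proved, stated in full; the proofs are below) =====
def Claim_equal_as_render_grid : Prop := ∀ (grid : List (List Int)), Dom_as_render_grid grid → Spec_as_render_grid grid (as_render_grid grid)

-- ===== LEMMAS AND PROOFS =====

theorem pvTokA_eq_tokB : pvTokA = pvTokB := rfl

theorem pvLoopA_spec (xs : List String) : ∀ (parts : List String) (rc : String) (rl : Nat),
    pvLoopA xs parts rc rl
      = parts ++ (pvTokA rc (rl + (xs.takeWhile (· == rc)).length)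
          :: pvRleTokens (xs.dropWhile (· == rc))) := by
  induction xs with
  | nil => intro parts rc rl; simp [pvLoopA, pvRleTokens]
  | cons x xs ih =>
    intro parts rc rl
    by_cases h : x == rc
    · simp only [pvLoopA, h, if_pos, List.takeWhile_cons, List.dropWhile_cons]
      rw [ih]
      simp [Nat.add_assoc, Nat.add_comm 1]
    · simp only [pvLoopA, h, List.takeWhile_cons, List.dropWhile_cons]
      rw [if_neg (by simp_all), if_neg (by simp_all), ih]
      simp [pvRleTokens, pvTokA_eq_tokB]

theorem pvLine_eq (i : Int) (row : List Int) : pvLineA i row = pvLineB i row := by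
  unfold pvLineA pvLineB
  cases row with
  | nil => simp
  | cons c cs =>
    simp only [List.map_cons, reduceCtorEq, ite_false]
    rw [pvLoopA_spec]
    simp [pvRleTokens, pvTokA_eq_tokB]

theorem pvFoldl_append_map {α β : Type} (xs : List α) (f : α → β) :
    ∀ acc : List β, xs.foldl (fun ls p => ls ++ [f p]) acc = acc ++ xs.map f := by
  induction xs with
  | nil => simp
  | cons x xs ih => intro acc; simp [List.foldl_cons, ih]

-- ===== VERDICT (by name: the statement is the Claim_ definition above) =====
theorem as_render_grid_spec : Claim_equal_as_render_grid := by
  intro grid _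
  show as_render_grid grid = as_render_grid_alt grid
  cases grid with
  | nil => rfl
  | cons r rs =>
    unfold as_render_grid as_render_grid_alt
    rw [pvFoldl_append_map, if_neg (by simp)]
    simp only [List.nil_append]
    congr 1
    exact List.map_congr_left (fun p _ => pvLine_eq p.1 p.2)
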